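-- pv_equiv track=rewrite | github.com/Francepnadeau/Project_Masters | code/Recurrence_Touzet_Nov2.py | encod_letters
-- ===== SOURCE A (Python) =====
-- K_dist=1
--
-- def encod_letters(Sigma,P):  #sigma is a list of letters, P is the original word
--     P_prime='$'*K_dist + P + '$'*(2*K_dist)  #We want to have bit vectors representing only the $'s at the end, not at the front
--     bit_vector=[]
--     transition = []
--     final=[None]*(len(P_prime)-2*K_dist)
--     for i in range(len(P_prime)-2*K_dist):
--         final[i]=[]
--
--     for letter in Sigma:  #Construct all possible bit vectors for each letter of the alphabet
--         bit = ''
--         for i in range(len(P_prime)):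
--             if letter == P_prime[i]:
--                 bit += '1'
--             else:
--                 bit += '0'
--         bit_vector.append(bit)
--
--     for vector in bit_vector: #Divide every vector in substring of length 2(K_dist)+1
--         for j in range(len(P_prime)-2*K_dist):
--             vec=''
--             for i in range(j,j+2*K_dist+1):
--                 vec+=vector[i]
--             transition.append(((vec),j))
--
--     for j in range(len(P_prime)-2*K_dist): #Sort the elements of transition by order and eleminate duplicate
--         for i in range(len(transition)):
--             if transition[i][1]==j and transition[i][0] not in final[j]:
--                 final[j].append(transition[i][0])
--
--     return(final)
-- ===== SOURCE B (Python) =====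
-- K_dist = 1
--
-- def encod_letters(Sigma, P):
--     # Direct per-index computation: for each window position j, build each
--     # letter's 0/1 window straight from the padded word and dedup first-seen.
--     P_prime = '$' * K_dist + P + '$' * (2 * K_dist)
--     w = 2 * K_dist + 1
--     final = []
--     for j in range(len(P_prime) - 2 * K_dist):
--         group = []
--         for letter in Sigma:
--             vec = ''.join('1' if c == letter else '0' for c in P_prime[j:j + w])
--             if vec not in group:
--                 group.append(vec)
--         final.append(group)
--     return final
-- ===== Notes on version B (the rewrite author's own statement) =====
-- stated objective: faster
-- what changed: B drops A's bit_vector and transition tables entirely and, for each window position j, builds each letter's 0/1 window string directly from the padded word P_prime[j:j+3] with first-seen dedup; this removes A's per-index rescan of the full |Sigma|*(|P|+1)-entry transition list.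
import Mathlib
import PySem

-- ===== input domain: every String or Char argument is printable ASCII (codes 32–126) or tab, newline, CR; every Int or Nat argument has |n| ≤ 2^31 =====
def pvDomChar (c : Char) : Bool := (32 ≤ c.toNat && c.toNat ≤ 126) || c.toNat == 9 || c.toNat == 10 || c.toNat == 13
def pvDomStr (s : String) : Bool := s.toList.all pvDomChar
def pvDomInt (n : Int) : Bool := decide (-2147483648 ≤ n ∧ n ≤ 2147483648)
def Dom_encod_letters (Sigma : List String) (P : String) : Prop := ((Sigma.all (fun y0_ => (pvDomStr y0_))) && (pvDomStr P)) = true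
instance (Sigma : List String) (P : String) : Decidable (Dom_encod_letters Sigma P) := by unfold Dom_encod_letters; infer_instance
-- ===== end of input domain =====

-- B drops A's bit_vector/transition tables and computes each index's distinct
-- window group directly per position, removing the per-index rescan of the full
-- transition list (objective: faster; a timing run measured the speedup).

-- ===== PORT A =====
-- module constant K_dist = 1
def pvKdist : Nat := 1

-- Literal port of A. Python strings built char-by-char with '+=' are List Char
-- here, wrapped with String.mk exactly where Python stores the finished string;
-- every index A uses is in range, so List.getD is exact for s[i]/vector[i].
-- A's '[None]*m then final[i]=[]' initialisation followed by filling final[j]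
-- in order j = 0..m-1 is rendered as the last foldl appending final[j] in order.
def encod_letters (Sigma : List String) (P : String) : List (List String) :=
  let pp : List Char := List.replicate pvKdist '$' ++ P.toList ++ List.replicate (2 * pvKdist) '$'
  let m : Nat := pp.length - 2 * pvKdist
  let bit_vector : List (List Char) :=
    Sigma.foldl (fun bv letter =>
      bv ++ [(List.range pp.length).foldl
        (fun bit i => bit ++ [if letter == String.mk [pp.getD i ' '] then '1' else '0']) []]) []
  let transition : List (String × Nat) :=
    bit_vector.foldl (fun tr vector =>
      (List.range m).foldl (fun tr2 j =>
        tr2 ++ [(String.mk ((List.range' j (2 * pvKdist + 1)).foldl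
          (fun vec i => vec ++ [vector.getD i ' ']) []), j)]) tr) []
  (List.range m).foldl (fun fin j =>
    fin ++ [transition.foldl (fun fj t =>
      if t.2 == j && !(fj.contains t.1) then fj ++ [t.1] else fj) []]) []

-- ===== PORT B =====
-- Literal port of Source B: per position j, per letter, build the window string
-- from the slice P_prime[j:j+3] and append it to the group if unseen.
def encod_letters_alt (Sigma : List String) (P : String) : List (List String) :=
  let pp : List Char := List.replicate 1 '$' ++ P.toList ++ List.replicate 2 '$'
  (List.range (pp.length - 2)).map (fun j =>
    Sigma.foldl (fun group letter =>
      if !(group.contains (String.mk (((pp.drop j).take 3).map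
            (fun c => if String.mk [c] == letter then '1' else '0'))))
      then group ++ [String.mk (((pp.drop j).take 3).map
            (fun c => if String.mk [c] == letter then '1' else '0'))]
      else group) [])

-- ===== PRECONDITION & SPEC =====
def Spec_encod_letters (Sigma : List String) (P : String) (out : List (List String)) : Prop := out = encod_letters_alt Sigma P
instance (Sigma : List String) (P : String) (out : List (List String)) : Decidable (Spec_encod_letters Sigma P out) := by unfold Spec_encod_letters; infer_instance

-- ===== CLAIM (what is proved, stated in full; the proofs are below) =====
def Claim_equal_encod_letters : Prop := ∀ (Sigma : List String) (P : String), Dom_encod_letters Sigma P → Spec_encod_letters Sigma P (encod_letters Sigma P)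

-- ===== LEMMAS AND PROOFS =====

-- A's bit-vector loop for one letter is the map of its per-char test over pp.
theorem pvBitVec (pp : List Char) (letter : String) (d : Char) :
    (List.range pp.length).foldl
      (fun bit i => bit ++ [if letter == String.mk [pp.getD i d] then '1' else '0']) []
    = pp.map (fun c => if letter == String.mk [c] then '1' else '0') := by
  rw [PySem.List.foldl_append_singleton_eq_map, List.nil_append]
  rw [show (fun i => if letter == String.mk [pp.getD i d] then '1' else '0')
      = (fun c => if letter == String.mk [c] then '1' else '0') ∘ (fun i => pp.getD i d) from rfl,
    ← List.map_map]
  congr 1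
  apply List.ext_getElem (by simp)
  intro i h1 h2
  simp only [List.getElem_map, List.getElem_range]
  exact List.getD_eq_getElem pp d h2

-- A's window loop collects v[j], v[j+1], v[j+2], i.e. the slice (v.drop j).take 3.
theorem pvWindow (v : List Char) (j : Nat) (d : Char) (h : j + 3 ≤ v.length) :
    (List.range' j 3).foldl (fun vec i => vec ++ [v.getD i d]) []
    = (v.drop j).take 3 := by
  have h0 : j < v.length := by omega
  have h1 : j + 1 < v.length := by omega
  have h2 : j + 2 < v.length := by omega
  show [v.getD j d, v.getD (j+1) d, v.getD (j+2) d] = _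
  rw [List.drop_eq_getElem_cons h0, List.drop_eq_getElem_cons h1, List.drop_eq_getElem_cons h2,
    List.getD_eq_getElem v d h0, List.getD_eq_getElem v d h1, List.getD_eq_getElem v d h2]
  rfl

-- Scanning entries whose index differs from j leaves the accumulator unchanged.
theorem pvScanSkip (ns : List Nat) (j : Nat) (w : Nat → String) (fj : List String)
    (h : ∀ x ∈ ns, x ≠ j) :
    (ns.map (fun j' => (w j', j'))).foldl
      (fun fj t => if t.2 == j && !(fj.contains t.1) then fj ++ [t.1] else fj) fj = fj := by
  induction ns generalizing fj with
  | nil => rfl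
  | cons a l ih =>
    have ha : a ≠ j := h a (by simp)
    simp only [List.map_cons, List.foldl_cons]
    rw [if_neg (by simp [ha])]
    exact ih fj (fun x hx => h x (by simp [hx]))

-- One vector's block of transition entries contributes exactly its j-window.
theorem pvScanBlock (m j : Nat) (hj : j < m) (w : Nat → String) (fj : List String) :
    ((List.range m).map (fun j' => (w j', j'))).foldl
      (fun fj t => if t.2 == j && !(fj.contains t.1) then fj ++ [t.1] else fj) fj
    = if !(fj.contains (w j)) then fj ++ [w j] else fj := by
  have hsplit : List.range m = List.range' 0 j ++ (j :: List.range' (j+1) (m - j - 1)) := by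
    rw [List.range_eq_range', ← List.range'_succ (s := j) (step := 1)]
    have := List.range'_append (s := 0) (m := j) (n := m - j) (step := 1)
    simp only [Nat.one_mul, Nat.zero_add] at this
    rw [show m = j + (m - j) from by omega, ← this]
    congr 2
    omega
  rw [hsplit, List.map_append, List.foldl_append,
    pvScanSkip _ j w fj (by intro x hx; rw [List.mem_range'_1] at hx; omega),
    List.map_cons, List.foldl_cons]
  rw [show (if ((w j, j).2 == j && !(fj.contains (w j, j).1)) then fj ++ [(w j, j).1] else fj)
      = if !(fj.contains (w j)) then fj ++ [w j] else fj from by simp]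
  exact pvScanSkip _ j w _ (by intro x hx; rw [List.mem_range'_1] at hx; omega)

-- The full transition scan for index j equals the direct per-vector fold.
theorem pvScanAll (vs : List (List Char)) (m j : Nat) (hj : j < m) (wf : List Char → Nat → String)
    (fj : List String) :
    (vs.flatMap (fun v => (List.range m).map (fun j' => (wf v j', j')))).foldl
      (fun fj t => if t.2 == j && !(fj.contains t.1) then fj ++ [t.1] else fj) fj
    = vs.foldl (fun fj v => if !(fj.contains (wf v j)) then fj ++ [wf v j] else fj) fj := by
  induction vs generalizing fj with
  | nil => rfl
  | cons v l ih =>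
    simp only [List.flatMap_cons, List.foldl_append, List.foldl_cons]
    rw [pvScanBlock m j hj (wf v) fj, ih]

-- ===== VERDICT (by name: the statement is the Claim_ definition above) =====
theorem encod_letters_spec : Claim_equal_encod_letters := by
  intro Sigma P _
  unfold Spec_encod_letters encod_letters encod_letters_alt pvKdist
  simp only [Nat.reduceMul, Nat.reduceAdd]
  set pp : List Char := List.replicate 1 '$' ++ P.toList ++ List.replicate 2 '$' with hpp
  set m : Nat := pp.length - 2 with hm
  have hlen : pp.length = P.toList.length + 3 := by simp [hpp]
  -- bit_vector = Sigma.map (per-letter bit map)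
  rw [show (fun bv letter => bv ++ [(List.range pp.length).foldl
        (fun bit i => bit ++ [if letter == String.mk [pp.getD i ' '] then '1' else '0']) []])
      = (fun bv (letter : String) =>
          bv ++ [pp.map (fun c => if letter == String.mk [c] then '1' else '0')]) from
      funext fun bv => funext fun letter => by rw [pvBitVec]]
  rw [PySem.List.foldl_append_singleton_eq_map
        (fun letter => pp.map (fun c => if letter == String.mk [c] then '1' else '0')) Sigma [],
    List.nil_append]
  -- transition = flatMap of per-vector window blocks
  rw [show (fun tr (vector : List Char) => (List.range m).foldl (fun tr2 j =>
        tr2 ++ [(String.mk ((List.range' j 3).foldl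
          (fun vec i => vec ++ [vector.getD i ' ']) []), j)]) tr)
      = (fun tr (vector : List Char) => tr ++ (List.range m).map (fun j =>
          (String.mk ((List.range' j 3).foldl
            (fun vec i => vec ++ [vector.getD i ' ']) []), j))) from
      funext fun tr => funext fun vector => by
        rw [PySem.List.foldl_append_singleton_eq_map]]
  rw [PySem.List.foldl_append_eq_flatMap
        (fun (vector : List Char) => (List.range m).map (fun j =>
          (String.mk ((List.range' j 3).foldl
            (fun vec i => vec ++ [vector.getD i ' ']) []), j)))
        (Sigma.map (fun letter => pp.map (fun c => if letter == String.mk [c] then '1' else '0'))) [],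
    List.nil_append]
  -- the final[j] filling loop is a map over j
  rw [PySem.List.foldl_append_singleton_eq_map
        (fun j => (((Sigma.map (fun letter => pp.map (fun c => if letter == String.mk [c] then '1' else '0'))).flatMap
          (fun (vector : List Char) => (List.range m).map (fun j =>
            (String.mk ((List.range' j 3).foldl
              (fun vec i => vec ++ [vector.getD i ' ']) []), j)))).foldl (fun fj t =>
          if t.2 == j && !(fj.contains t.1) then fj ++ [t.1] else fj) [])) (List.range m) [],
    List.nil_append]
  apply List.map_congr_left
  intro j hj
  rw [List.mem_range] at hj
  rw [pvScanAll _ m j hj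
      (fun v j' => String.mk ((List.range' j' 3).foldl (fun vec i => vec ++ [v.getD i ' ']) [])) [],
    List.foldl_map]
  congr 1
  funext fj letter
  rw [pvWindow (pp.map fun c => if letter == String.mk [c] then '1' else '0') j ' '
      (by rw [List.length_map]; omega),
    ← List.map_drop, ← List.map_take]
  have : (fun c => if letter == String.mk [c] then '1' else '0')
       = (fun c => if String.mk [c] == letter then '1' else '0') := by
    funext c; rw [Bool.beq_comm]
  rw [this]
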